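-- pv_equiv track=rewrite | github.com/fredanie2005/PythonProject | TP1.py | pave_plein
-- ===== SOURCE A (Python) =====
-- def pave_plein(xmin, xmax, ymin, ymax, zmin, zmax):
--     X = []
--     Y = []
--     Z = []
--     for x in range(xmin, xmax + 1):
--         for y in range(ymin, ymax + 1):
--             for z in range(zmin, zmax + 1):
--                 X.append(x)
--                 Y.append(y)
--                 Z.append(z)
--     return X, Y, Z
-- ===== SOURCE B (Python) =====
-- def pave_plein(xmin, xmax, ymin, ymax, zmin, zmax):
--     # Flat construction from the repetition pattern of each coordinate
--     # instead of triple nested appends (objective: alternative decomposition).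
--     nx = max(0, xmax - xmin + 1)
--     ny = max(0, ymax - ymin + 1)
--     nz = max(0, zmax - zmin + 1)
--     if nx == 0 or ny == 0 or nz == 0:
--         return [], [], []
--     xs = list(range(xmin, xmax + 1))
--     ys = list(range(ymin, ymax + 1))
--     zs = list(range(zmin, zmax + 1))
--     X = [x for x in xs for _ in range(ny * nz)]
--     Y = [y for _ in xs for y in ys for _ in range(nz)]
--     Z = zs * (nx * ny)
--     return X, Y, Z
-- ===== Notes on version B (the rewrite author's own statement) =====
-- stated objective: alternative
-- what changed: Replaces the triple nested loop with per-coordinate flat construction: X/Y/Z are built directly from the known repetition pattern (each x repeated ny*nz times, the ys block repeated per x with each y repeated nz times, and zs tiled nx*ny times).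
import Mathlib
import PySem

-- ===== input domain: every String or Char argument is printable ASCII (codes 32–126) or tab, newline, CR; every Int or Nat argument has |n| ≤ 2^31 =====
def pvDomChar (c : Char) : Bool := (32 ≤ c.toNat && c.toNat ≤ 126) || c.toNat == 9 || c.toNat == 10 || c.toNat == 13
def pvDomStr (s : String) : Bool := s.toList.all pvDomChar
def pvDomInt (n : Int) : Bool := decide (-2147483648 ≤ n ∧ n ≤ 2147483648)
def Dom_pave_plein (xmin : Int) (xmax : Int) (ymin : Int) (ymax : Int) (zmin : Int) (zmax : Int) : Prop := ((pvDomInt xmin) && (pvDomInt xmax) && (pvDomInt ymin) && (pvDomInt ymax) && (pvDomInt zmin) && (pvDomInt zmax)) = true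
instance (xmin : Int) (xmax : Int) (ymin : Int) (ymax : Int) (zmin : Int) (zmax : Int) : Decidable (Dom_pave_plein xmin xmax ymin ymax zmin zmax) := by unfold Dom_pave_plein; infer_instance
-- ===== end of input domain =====

-- ===== PORT A =====
-- Literal port of A: triple nested for-loops appending to X, Y, Z.
def pave_plein (xmin : Int) (xmax : Int) (ymin : Int) (ymax : Int) (zmin : Int) (zmax : Int) : List Int × List Int × List Int :=
  (PySem.List.pyRange xmin (xmax + 1) 1).foldl (fun acc x =>
    (PySem.List.pyRange ymin (ymax + 1) 1).foldl (fun acc y =>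
      (PySem.List.pyRange zmin (zmax + 1) 1).foldl (fun acc z =>
        (acc.1 ++ [x], acc.2.1 ++ [y], acc.2.2 ++ [z])) acc) acc)
    ([], [], [])

-- ===== PORT B =====
-- Port of B: flat construction from the repetition pattern of each coordinate,
-- with an early return for an empty box (so no coordinate list is built then).
def pave_plein_alt (xmin : Int) (xmax : Int) (ymin : Int) (ymax : Int) (zmin : Int) (zmax : Int) : List Int × List Int × List Int :=
  let nx := (xmax + 1 - xmin).toNat   -- max(0, xmax - xmin + 1)
  let ny := (ymax + 1 - ymin).toNat
  let nz := (zmax + 1 - zmin).toNat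
  if nx = 0 ∨ ny = 0 ∨ nz = 0 then ([], [], [])
  else
    let xs := PySem.List.pyRange xmin (xmax + 1) 1
    let ys := PySem.List.pyRange ymin (ymax + 1) 1
    let zs := PySem.List.pyRange zmin (zmax + 1) 1
    let X := xs.flatMap (fun x => List.replicate (ny * nz) x)
    let Y := xs.flatMap (fun _ => ys.flatMap (fun y => List.replicate nz y))
    let Z := (List.replicate (nx * ny) zs).flatten
    (X, Y, Z)

-- ===== PRECONDITION & SPEC =====
def Spec_pave_plein (xmin : Int) (xmax : Int) (ymin : Int) (ymax : Int) (zmin : Int) (zmax : Int) (out : List Int × List Int × List Int) : Prop := out = pave_plein_alt xmin xmax ymin ymax zmin zmax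
instance (xmin : Int) (xmax : Int) (ymin : Int) (ymax : Int) (zmin : Int) (zmax : Int) (out : List Int × List Int × List Int) : Decidable (Spec_pave_plein xmin xmax ymin ymax zmin zmax out) := by unfold Spec_pave_plein; infer_instance

-- ===== CLAIM (what is proved, stated in full; the proofs are below) =====
def Claim_equal_pave_plein : Prop := ∀ (xmin : Int) (xmax : Int) (ymin : Int) (ymax : Int) (zmin : Int) (zmax : Int), Dom_pave_plein xmin xmax ymin ymax zmin zmax → Spec_pave_plein xmin xmax ymin ymax zmin zmax (pave_plein xmin xmax ymin ymax zmin zmax)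

-- ===== LEMMAS AND PROOFS =====

lemma pv_inner (zs : List Int) (x y : Int) (acc : List Int × List Int × List Int) :
    zs.foldl (fun acc z => (acc.1 ++ [x], acc.2.1 ++ [y], acc.2.2 ++ [z])) acc
      = (acc.1 ++ List.replicate zs.length x, acc.2.1 ++ List.replicate zs.length y, acc.2.2 ++ zs) := by
  induction zs generalizing acc with
  | nil => simp
  | cons z zs ih => simp [ih, List.replicate_succ]

lemma pv_middle (ys zs : List Int) (x : Int) (acc : List Int × List Int × List Int) :
    ys.foldl (fun acc y => zs.foldl (fun acc z => (acc.1 ++ [x], acc.2.1 ++ [y], acc.2.2 ++ [z])) acc) acc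
      = (acc.1 ++ List.replicate (ys.length * zs.length) x,
         acc.2.1 ++ ys.flatMap (fun y => List.replicate zs.length y),
         acc.2.2 ++ (List.replicate ys.length zs).flatten) := by
  induction ys generalizing acc with
  | nil => simp
  | cons y ys ih =>
      rw [List.foldl_cons, pv_inner, ih]
      have hc : (ys.length + 1) * zs.length = zs.length + ys.length * zs.length := by ring
      simp only [List.length_cons, hc, List.replicate_add, List.flatMap_cons,
        List.replicate_succ, List.flatten_cons, List.append_assoc]

lemma pv_outer (xs ys zs : List Int) (acc : List Int × List Int × List Int) :
    xs.foldl (fun acc x => ys.foldl (fun acc y => zs.foldl (fun acc z => (acc.1 ++ [x], acc.2.1 ++ [y], acc.2.2 ++ [z])) acc) acc) acc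
      = (acc.1 ++ xs.flatMap (fun x => List.replicate (ys.length * zs.length) x),
         acc.2.1 ++ xs.flatMap (fun _ => ys.flatMap (fun y => List.replicate zs.length y)),
         acc.2.2 ++ (List.replicate (xs.length * ys.length) zs).flatten) := by
  induction xs generalizing acc with
  | nil => simp
  | cons x xs ih =>
      rw [List.foldl_cons, pv_middle, ih]
      have hc : (xs.length + 1) * ys.length = ys.length + xs.length * ys.length := by ring
      simp only [List.length_cons, hc, List.replicate_add, List.flatMap_cons,
        List.flatten_append, List.append_assoc]

-- ===== VERDICT (by name: the statement is the Claim_ definition above) =====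
theorem pave_plein_spec : Claim_equal_pave_plein := by
  intro xmin xmax ymin ymax zmin zmax _
  unfold Spec_pave_plein pave_plein pave_plein_alt
  rw [pv_outer]
  dsimp only
  split_ifs with h
  · rcases h with h | h | h
    · rw [PySem.List.pyRange_one_eq_nil (a := xmin) (b := xmax + 1) (by omega)]
      simp
    · rw [PySem.List.pyRange_one_eq_nil (a := ymin) (b := ymax + 1) (by omega)]
      simp
    · rw [PySem.List.pyRange_one_eq_nil (a := zmin) (b := zmax + 1) (by omega)]
      simp
  · simp only [PySem.List.length_pyRange_one, List.nil_append]
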